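-- pv_equiv track=rewrite | github.com/zalmane/ttyd | compact_rl.py | _extract_until_keyword
-- ===== SOURCE A (Python) =====
-- def _extract_until_keyword(text: str, keywords: list[str]) -> tuple[str, str]:
--     """Extract text until the next keyword, respecting parentheses and quotes."""
--     depth = 0
--     in_string = False
--     string_char = None
--     i = 0
--     while i < len(text):
--         ch = text[i]
--         if in_string:
--             if ch == string_char and (i == 0 or text[i - 1] != "\\"):
--                 in_string = False
--             i += 1
--             continue
--         if ch in ('"', "'"):
--             in_string = True
--             string_char = ch
--             i += 1
--             continue
--         if ch in ("(", "{", "["):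
--             depth += 1
--             i += 1
--             continue
--         if ch in (")", "}", "]"):
--             depth -= 1
--             i += 1
--             continue
--         if depth == 0:
--             for kw in keywords:
--                 if text[i:].startswith(kw + " ") or text[i:] == kw:
--                     return text[:i].rstrip(), text[i:]
--         i += 1
--     return text, ""
-- ===== SOURCE B (Python) =====
-- def _extract_until_keyword(text: str, keywords: list[str]) -> tuple[str, str]:
--     """Two-pass version: collect depth-0 candidate positions, then match keywords."""
--     candidates = []
--     depth = 0
--     in_string = False
--     string_char = None
--     prev = None
--     i = 0
--     for ch in text:
--         if in_string:
--             if ch == string_char and prev != "\\":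
--                 in_string = False
--         elif ch in '"\'':
--             in_string = True
--             string_char = ch
--         elif ch in "({[":
--             depth += 1
--         elif ch in ")}]":
--             depth -= 1
--         elif depth == 0:
--             candidates.append(i)
--         prev = ch
--         i += 1
--     for i in candidates:
--         rest = text[i:]
--         if any(rest == kw or rest.startswith(kw + " ") for kw in keywords):
--             return text[:i].rstrip(), rest
--     return text, ""
-- ===== Notes on version B (the rewrite author's own statement) =====
-- stated objective: alternative
-- what changed: A interleaves keyword testing into its character scan, building kw+' ' and two text[i:] slices per keyword at every depth-0 position, and peeks back at text[i-1] for the escape rule; B separates the work into two passes: a state-machine fold that tracks the previous character in state and records every depth-0 candidate index, then a scan of that index list that slices the suffix once per candidate and matches keywords against it.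
import Mathlib
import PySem

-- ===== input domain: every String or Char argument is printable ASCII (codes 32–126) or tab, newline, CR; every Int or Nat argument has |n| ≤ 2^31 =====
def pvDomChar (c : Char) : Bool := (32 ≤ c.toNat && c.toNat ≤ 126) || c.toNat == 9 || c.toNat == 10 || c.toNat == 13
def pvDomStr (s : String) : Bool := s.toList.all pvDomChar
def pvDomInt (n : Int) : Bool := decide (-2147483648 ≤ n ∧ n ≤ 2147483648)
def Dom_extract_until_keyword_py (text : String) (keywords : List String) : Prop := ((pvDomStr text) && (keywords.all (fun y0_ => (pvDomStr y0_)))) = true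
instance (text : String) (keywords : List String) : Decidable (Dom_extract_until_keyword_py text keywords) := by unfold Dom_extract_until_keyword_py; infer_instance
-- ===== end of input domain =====

-- B is an alternative decomposition of A: one fold collecting candidate indices, then a keyword scan over them.

-- ===== PORT A =====
-- A's while loop: index i, state (depth, in_string, string_char); keyword test inline at depth 0.
def loopA (cs : List Char) (kws : List String) (depth : Int) (ins : Bool)
    (sc : Option Char) (i : Nat) : String × String :=
  if h : i < cs.length then
    let ch := cs[i]
    if ins then
      loopA cs kws depth
        (if some ch = sc ∧ (i = 0 ∨ cs[i-1]? ≠ some '\\') then false else ins) sc (i+1)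
    else if ch = '"' ∨ ch = '\'' then
      loopA cs kws depth true (some ch) (i+1)
    else if ch = '(' ∨ ch = '{' ∨ ch = '[' then
      loopA cs kws (depth+1) ins sc (i+1)
    else if ch = ')' ∨ ch = '}' ∨ ch = ']' then
      loopA cs kws (depth-1) ins sc (i+1)
    else if depth = 0 ∧
        kws.any (fun kw => PySem.Chars.startswith (cs.drop i) (kw.toList ++ [' '])
                           || decide (cs.drop i = kw.toList)) then
      (String.ofList (PySem.Chars.rstrip (cs.take i)), String.ofList (cs.drop i))
    else
      loopA cs kws depth ins sc (i+1)
  else (String.ofList cs, "")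
termination_by cs.length - i

def extract_until_keyword_py (text : String) (keywords : List String) : String × String :=
  loopA text.toList keywords 0 false none 0

-- ===== PORT B =====
-- B's second pass: first candidate index whose suffix matches a keyword.
def findB (cs : List Char) (kws : List String) : List Nat → String × String
  | [] => (String.ofList cs, "")
  | i :: rest =>
    if kws.any (fun kw => decide (cs.drop i = kw.toList)
                          || PySem.Chars.startswith (cs.drop i) (kw.toList ++ [' '])) then
      (String.ofList (PySem.Chars.rstrip (cs.take i)), String.ofList (cs.drop i))
    else findB cs kws rest

-- B's first pass: one fold over the characters; state (i, depth, in_string, string_char, prev, candidates).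
def stepB (st : Nat × Int × Bool × Option Char × Option Char × List Nat) (ch : Char) :
    Nat × Int × Bool × Option Char × Option Char × List Nat :=
  let (i, depth, ins, sc, prev, cands) := st
  if ins then
    (i+1, depth, (if some ch = sc ∧ prev ≠ some '\\' then false else ins), sc, some ch, cands)
  else if ch = '"' ∨ ch = '\'' then
    (i+1, depth, true, some ch, some ch, cands)
  else if ch = '(' ∨ ch = '{' ∨ ch = '[' then
    (i+1, depth+1, ins, sc, some ch, cands)
  else if ch = ')' ∨ ch = '}' ∨ ch = ']' then
    (i+1, depth-1, ins, sc, some ch, cands)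
  else if depth = 0 then
    (i+1, depth, ins, sc, some ch, cands ++ [i])
  else
    (i+1, depth, ins, sc, some ch, cands)

def extract_until_keyword_py_alt (text : String) (keywords : List String) : String × String :=
  let cs := text.toList
  let st := cs.foldl stepB (0, 0, false, none, none, [])
  findB cs keywords st.2.2.2.2.2

-- ===== PRECONDITION & SPEC =====
def Spec_extract_until_keyword_py (text : String) (keywords : List String) (out : String × String) : Prop := out = extract_until_keyword_py_alt text keywords
instance (text : String) (keywords : List String) (out : String × String) : Decidable (Spec_extract_until_keyword_py text keywords out) := by unfold Spec_extract_until_keyword_py; infer_instance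

-- ===== CLAIM (what is proved, stated in full; the proofs are below) =====
def Claim_equal_extract_until_keyword_py : Prop := ∀ (text : String) (keywords : List String), Dom_extract_until_keyword_py text keywords → Spec_extract_until_keyword_py text keywords (extract_until_keyword_py text keywords)

-- ===== LEMMAS AND PROOFS =====

-- Proof-only helper: the candidate indices the state machine produces from position i onwards.
def scanS (suf : List Char) (i : Nat) (depth : Int) (ins : Bool)
    (sc : Option Char) (prev : Option Char) : List Nat :=
  match suf with
  | [] => []
  | ch :: rest =>
    if ins then
      scanS rest (i+1) depth (if some ch = sc ∧ prev ≠ some '\\' then false else ins) sc (some ch)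
    else if ch = '"' ∨ ch = '\'' then
      scanS rest (i+1) depth true (some ch) (some ch)
    else if ch = '(' ∨ ch = '{' ∨ ch = '[' then
      scanS rest (i+1) (depth+1) ins sc (some ch)
    else if ch = ')' ∨ ch = '}' ∨ ch = ']' then
      scanS rest (i+1) (depth-1) ins sc (some ch)
    else if depth = 0 then
      i :: scanS rest (i+1) depth ins sc (some ch)
    else
      scanS rest (i+1) depth ins sc (some ch)

lemma any_match_comm (kws : List String) (l : List Char) :
    (kws.any (fun kw => PySem.Chars.startswith l (kw.toList ++ [' '])
                        || decide (l = kw.toList)))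
    = (kws.any (fun kw => decide (l = kw.toList)
                          || PySem.Chars.startswith l (kw.toList ++ [' ']))) := by
  simp [List.any_eq, Bool.or_comm]

-- B's fold produces exactly scanS's candidate list (accumulator generalized).
lemma foldl_stepB_eq_scanS (suf : List Char) :
    ∀ (i : Nat) (d : Int) (ins : Bool) (sc prev : Option Char) (cands : List Nat),
    (suf.foldl stepB (i, d, ins, sc, prev, cands)).2.2.2.2.2
      = cands ++ scanS suf i d ins sc prev := by
  induction suf with
  | nil => intro i d ins sc prev cands; simp [scanS]
  | cons ch rest ih =>
    intro i d ins sc prev cands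
    simp only [List.foldl_cons, stepB, scanS]
    split_ifs <;> simp [ih]

-- A's loop from position i equals findB applied to the candidates from position i on.
lemma loopA_eq_findB (cs : List Char) (kws : List String) :
    ∀ (suf : List Char) (i : Nat) (d : Int) (ins : Bool) (sc : Option Char),
    cs.drop i = suf → i ≤ cs.length →
    loopA cs kws d ins sc i
      = findB cs kws (scanS suf i d ins sc (if i = 0 then none else cs[i-1]?)) := by
  intro suf
  induction suf with
  | nil =>
    intro i d ins sc hdrop hle
    have hlen : cs.length ≤ i := by
      by_contra h
      have := List.drop_eq_nil_iff.mp hdrop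
      omega
    rw [loopA]
    simp [scanS, findB, Nat.not_lt.mpr hlen]
  | cons ch rest ih =>
    intro i d ins sc hdrop hle
    have hi : i < cs.length := by
      by_contra h
      rw [List.drop_eq_nil_of_le (by omega)] at hdrop
      exact List.cons_ne_nil _ _ hdrop.symm
    have hch : cs[i] = ch := by
      have h0 : (cs.drop i)[0]? = some ch := by simp [hdrop]
      rw [List.getElem?_drop] at h0
      simpa [List.getElem?_eq_getElem hi] using h0
    have hrest : cs.drop (i+1) = rest := by
      have : cs.drop (i+1) = (cs.drop i).drop 1 := by
        rw [List.drop_drop]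
      simpa [hdrop] using this
    have hprev : (if i + 1 = 0 then (none : Option Char) else cs[i+1-1]?) = some ch := by
      simp [List.getElem?_eq_getElem hi, hch]
    rw [loopA]
    simp only [hi, dif_pos, hch, scanS]
    by_cases hins : ins = true
    · subst hins
      simp only [if_true]
      have hesc : (if some ch = sc ∧ (i = 0 ∨ cs[i-1]? ≠ some '\\') then false else true)
          = (if some ch = sc ∧ (if i = 0 then (none : Option Char) else cs[i-1]?) ≠ some '\\'
             then false else true) := by
        by_cases h0 : i = 0 <;> simp [h0]
      rw [hesc, ih (i+1) d _ sc hrest (by omega), hprev]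
    · simp only [Bool.not_eq_true] at hins
      subst hins
      simp only [Bool.false_eq_true, if_false]
      by_cases hq : ch = '"' ∨ ch = '\''
      · simp only [if_pos hq]
        rw [ih (i+1) d true (some ch) hrest (by omega), hprev]
      · simp only [if_neg hq]
        by_cases ho : ch = '(' ∨ ch = '{' ∨ ch = '['
        · simp only [if_pos ho]
          rw [ih (i+1) (d+1) false sc hrest (by omega), hprev]
        · simp only [if_neg ho]
          by_cases hc : ch = ')' ∨ ch = '}' ∨ ch = ']'
          · simp only [if_pos hc]
            rw [ih (i+1) (d-1) false sc hrest (by omega), hprev]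
          · simp only [if_neg hc]
            by_cases hd : d = 0
            · subst hd
              by_cases hm : (kws.any (fun kw =>
                  PySem.Chars.startswith (cs.drop i) (kw.toList ++ [' '])
                  || decide (cs.drop i = kw.toList))) = true
              · have hm' := hm
                rw [any_match_comm] at hm'
                simp [hm, findB, hm']
              · simp only [Bool.not_eq_true] at hm
                have hm' := hm
                rw [any_match_comm] at hm'
                simp only [hm, Bool.false_eq_true, and_false, if_false]
                rw [ih (i+1) 0 false sc hrest (by omega), hprev]
                simp [findB, hm']
            · simp only [if_neg hd]
              have hda : ¬ (d = 0 ∧ (kws.any (fun kw =>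
                  PySem.Chars.startswith (cs.drop i) (kw.toList ++ [' '])
                  || decide (cs.drop i = kw.toList))) = true) := fun h => hd h.1
              rw [if_neg hda, ih (i+1) d false sc hrest (by omega), hprev]

-- ===== VERDICT (by name: the statement is the Claim_ definition above) =====
theorem extract_until_keyword_py_spec : Claim_equal_extract_until_keyword_py := by
  intro text keywords _
  unfold Spec_extract_until_keyword_py extract_until_keyword_py extract_until_keyword_py_alt
  show loopA text.toList keywords 0 false none 0
      = findB text.toList keywords
          (List.foldl stepB (0, 0, false, none, none, []) text.toList).2.2.2.2.2
  rw [show (List.foldl stepB (0, 0, false, none, none, []) text.toList).2.2.2.2.2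
        = [] ++ scanS text.toList 0 0 false none none from
      foldl_stepB_eq_scanS text.toList 0 0 false none none []]
  rw [loopA_eq_findB text.toList keywords text.toList 0 0 false none (by simp) (by simp)]
  simp
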